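-- pv_equiv track=rewrite | github.com/mfjkri/Algorithms-and-Data-Structures | 6-DynamicProgramming/Materials/code/04_StringConstruct/StringConstructTab.py | stringConstructTab
-- ===== SOURCE A (Python) =====
-- def stringConstructTab(array, targetString):
--     m = len(targetString)
--     table = [None] * (m + 1)
--     table[0] = []
--
--
--     for i in range(m + 1):
--         if table[i] != None:
--             for str in array:
--                 j = targetString[i:].find(str)
--                 k = len(str)
--
--                 if j == 0 and (i + k) < m + 1:
--                     newRes = table[i].copy()
--                     newRes.append(str)
--                     if table[i + k] == None or len(newRes) < len(table[i + k]):
--                         table[i + k] = newRes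
--
--     return table[m]
-- ===== SOURCE B (Python) =====
-- def stringConstructTab(array, targetString):
--     m = len(targetString)
--     dist = [None] * (m + 1)   # dist[p] = fewest pieces building targetString[:p]
--     pred = [None] * (m + 1)   # pred[p] = (source position, piece) of the chosen last piece
--     dist[0] = 0
--     for i in range(m + 1):
--         if dist[i] is None:
--             continue
--         for w in array:
--             k = len(w)
--             if w == targetString[i:i + k]:
--                 if dist[i + k] is None or dist[i] + 1 < dist[i + k]:
--                     dist[i + k] = dist[i] + 1
--                     pred[i + k] = (i, w)
--     if dist[m] is None:
--         return None
--     res = []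
--     p = m
--     while p > 0:
--         i, w = pred[p]
--         res.append(w)
--         p = i
--     res.reverse()
--     return res
-- ===== Notes on version B (the rewrite author's own statement) =====
-- stated objective: faster
-- what changed: A keeps a full candidate piece-list per table cell and copies it on every relaxation (and tests matches via find on a fresh suffix slice); B keeps only a piece-count and a backpointer per cell, relaxes with a direct slice comparison, and reconstructs the answer list once at the end.
import Mathlib
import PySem

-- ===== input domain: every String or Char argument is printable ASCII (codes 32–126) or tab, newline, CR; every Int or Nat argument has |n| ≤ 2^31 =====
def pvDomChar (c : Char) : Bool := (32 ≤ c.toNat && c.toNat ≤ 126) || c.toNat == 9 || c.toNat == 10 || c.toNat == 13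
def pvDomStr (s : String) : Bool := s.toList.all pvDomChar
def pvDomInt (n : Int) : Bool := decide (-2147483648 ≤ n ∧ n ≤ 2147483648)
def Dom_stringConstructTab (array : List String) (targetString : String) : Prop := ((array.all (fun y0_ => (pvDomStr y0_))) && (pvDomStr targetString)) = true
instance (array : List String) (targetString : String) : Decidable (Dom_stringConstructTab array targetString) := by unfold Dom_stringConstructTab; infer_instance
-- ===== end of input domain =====

-- B replaces A's per-update copying of candidate piece lists with a distance + backpointer
-- DP and a single reconstruction pass at the end (objective: faster).

-- ===== PORT A =====
-- inner 'for str in array' body of A (the 'none' match arm is unreachable: the outer loop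
-- only enters when table[i] != None)
def pvAInner (m : Int) (targetString : String) (i : Int)
    (table : List (Option (List String))) (s : String) : List (Option (List String)) :=
  let j := PySem.Str.find (PySem.Str.slice targetString (some i) none) s
  let k : Int := PySem.Str.len s
  if j = 0 ∧ i + k < m + 1 then
    match PySem.List.pyGetD table i none with
    | none => table
    | some cur =>
      let newRes := cur ++ [s]
      match PySem.List.pyGetD table (i + k) none with
      | none => PySem.List.pySetD table (i + k) (some newRes)
      | some old =>
        if newRes.length < old.length then PySem.List.pySetD table (i + k) (some newRes)
        else table
  else table

def stringConstructTab (array : List String) (targetString : String) : Option (List String) :=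
  let m : Int := PySem.Str.len targetString
  let table : List (Option (List String)) :=
    PySem.List.pySetD (List.replicate (m + 1).toNat none) 0 (some [])
  let table :=
    (PySem.List.pyRange 0 (m + 1) 1).foldl
      (fun t i =>
        if PySem.List.pyGetD t i none ≠ none then array.foldl (pvAInner m targetString i) t
        else t)
      table
  PySem.List.pyGetD table m none

-- ===== PORT B =====
-- inner 'for w in array' body of B (the 'none' match arm is unreachable: the outer loop
-- 'continue's when dist[i] is None)
def pvBInner (targetString : String) (i : Int)
    (st : List (Option Int) × List (Option (Int × String))) (w : String) :
    List (Option Int) × List (Option (Int × String)) :=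
  let k : Int := PySem.Str.len w
  if w = PySem.Str.slice targetString (some i) (some (i + k)) then
    match PySem.List.pyGetD st.1 i none with
    | none => st
    | some di =>
      match PySem.List.pyGetD st.1 (i + k) none with
      | none =>
          (PySem.List.pySetD st.1 (i + k) (some (di + 1)),
           PySem.List.pySetD st.2 (i + k) (some (i, w)))
      | some dq =>
          if di + 1 < dq then
            (PySem.List.pySetD st.1 (i + k) (some (di + 1)),
             PySem.List.pySetD st.2 (i + k) (some (i, w)))
          else st
  else st

-- the 'while p > 0' reconstruction walk; fuel makes it total (each step moves strictly
-- left, so fuel = m + 1 is never exhausted on reachable states)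
def pvWalk (pred : List (Option (Int × String))) : Nat → Int → List String → List String
  | 0, _, res => res
  | fuel + 1, p, res =>
    if 0 < p then
      match PySem.List.pyGetD pred p none with
      | some (i, w) => pvWalk pred fuel i (res ++ [w])
      | none => res
    else res

def stringConstructTab_alt (array : List String) (targetString : String) : Option (List String) :=
  let m : Int := PySem.Str.len targetString
  let dist : List (Option Int) :=
    PySem.List.pySetD (List.replicate (m + 1).toNat none) 0 (some 0)
  let pred : List (Option (Int × String)) := List.replicate (m + 1).toNat none
  let st :=
    (PySem.List.pyRange 0 (m + 1) 1).foldl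
      (fun st i =>
        if PySem.List.pyGetD st.1 i none ≠ none then array.foldl (pvBInner targetString i) st
        else st)
      (dist, pred)
  match PySem.List.pyGetD st.1 m none with
  | none => none
  | some _ => some (pvWalk st.2 (m.toNat + 1) m []).reverse

-- ===== PRECONDITION & SPEC =====
def Spec_stringConstructTab (array : List String) (targetString : String) (out : Option (List String)) : Prop := out = stringConstructTab_alt array targetString
instance (array : List String) (targetString : String) (out : Option (List String)) : Decidable (Spec_stringConstructTab array targetString out) := by unfold Spec_stringConstructTab; infer_instance

-- ===== CLAIM (what is proved, stated in full; the proofs are below) =====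
def Claim_equal_stringConstructTab : Prop := ∀ (array : List String) (targetString : String), Dom_stringConstructTab array targetString → Spec_stringConstructTab array targetString (stringConstructTab array targetString)


-- ===== LEMMAS AND PROOFS =====

-- reconstruction of the piece list encoded by the backpointer array, by position
def pvRecon (pred : List (Option (Int × String))) : Nat → Option (List String)
  | 0 => some []
  | p + 1 =>
    match pred.getD (p + 1) none with
    | none => none
    | some (si, w) =>
      if _h : si.toNat ≤ p then (pvRecon pred si.toNat).map (· ++ [w]) else none
  termination_by p => p
  decreasing_by omega

theorem pvRecon_zero (pred : List (Option (Int × String))) : pvRecon pred 0 = some [] := by rw [pvRecon]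

theorem pvRecon_succ (pred : List (Option (Int × String))) (p : Nat) :
    pvRecon pred (p + 1) =
      match pred.getD (p + 1) none with
      | none => none
      | some (si, w) =>
        if _ : si.toNat ≤ p then (pvRecon pred si.toNat).map (· ++ [w]) else none := by
  rw [pvRecon]

-- the joint invariant: lengths, backpointers point strictly left and below the frontier g,
-- dist mirrors the lengths of A's table entries, and A's table entries are exactly the
-- reconstructions from B's backpointers
def pvInv (m' g : Nat) (t : List (Option (List String))) (d : List (Option Int))
    (pr : List (Option (Int × String))) : Prop :=
  t.length = m' + 1 ∧ d.length = m' + 1 ∧ pr.length = m' + 1 ∧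
  (∀ p si w, pr.getD p none = some (si, w) → ∃ sn : Nat, si = (sn : Int) ∧ sn < p ∧ sn < g) ∧
  (∀ p, p ≤ m' → d.getD p none = (t.getD p none).map (fun l => (l.length : Int))) ∧
  (∀ p, p ≤ m' → t.getD p none = pvRecon pr p)

def pvT0 (m' : Nat) : List (Option (List String)) := (List.replicate (m' + 1) none).set 0 (some [])
def pvD0 (m' : Nat) : List (Option Int) := (List.replicate (m' + 1) none).set 0 (some 0)
def pvP0 (m' : Nat) : List (Option (Int × String)) := List.replicate (m' + 1) none

theorem pv_getD_set {α : Type} (xs : List α) (q : Nat) (hq : q < xs.length) (v d : α) (r : Nat) :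
    (xs.set q v).getD r d = if r = q then v else xs.getD r d := by
  by_cases h : r = q
  · subst h; simp [List.getD_eq_getElem?_getD, hq]
  · rw [List.getD_eq_getElem?_getD, List.getD_eq_getElem?_getD, List.getElem?_set,
      if_neg (Ne.symm h), if_neg h]

theorem pv_getD_replicate {α : Type} (n r : Nat) :
    (List.replicate n (none : Option α)).getD r none = none := by
  simp [List.getD_eq_getElem?_getD, List.getElem?_replicate]
  split <;> rfl

theorem pvInv_mono {m' g g' : Nat} {t d pr} (h : g ≤ g') (hI : pvInv m' g t d pr) :
    pvInv m' g' t d pr := by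
  obtain ⟨h1, h2, h3, hP, hD, hR⟩ := hI
  exact ⟨h1, h2, h3, fun p si w hp => by
    obtain ⟨sn, e1, e2, e3⟩ := hP p si w hp
    exact ⟨sn, e1, e2, lt_of_lt_of_le e3 h⟩, hD, hR⟩

theorem pvInv_init (m' : Nat) : pvInv m' 0 (pvT0 m') (pvD0 m') (pvP0 m') := by
  have hl : (List.replicate (m' + 1) (none : Option (List String))).length = m' + 1 := by simp
  have hl' : (List.replicate (m' + 1) (none : Option Int)).length = m' + 1 := by simp
  refine ⟨by simp [pvT0], by simp [pvD0], by simp [pvP0], ?_, ?_, ?_⟩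
  · intro p si w hp
    rw [pvP0, pv_getD_replicate] at hp
    exact absurd hp (by simp)
  · intro p _
    cases p with
    | zero =>
        rw [pvT0, pvD0, pv_getD_set _ 0 (by simp) _ _ 0, pv_getD_set _ 0 (by simp) _ _ 0]
        simp
    | succ pp =>
        rw [pvT0, pvD0, pv_getD_set _ 0 (by simp) _ _ (pp + 1), pv_getD_set _ 0 (by simp) _ _ (pp + 1)]
        simp
  · intro p _
    cases p with
    | zero =>
        rw [pvT0, pv_getD_set _ 0 (by simp) _ _ 0, pvRecon_zero]
        simp
    | succ pp =>
        rw [pvT0, pv_getD_set _ 0 (by simp) _ _ (pp + 1), pvRecon_succ, pvP0, pv_getD_replicate]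
        simp

theorem pvRecon_congr (pr pr' : List (Option (Int × String))) :
    ∀ p, (∀ r, r ≤ p → pr.getD r none = pr'.getD r none) → pvRecon pr p = pvRecon pr' p := by
  intro p
  induction p using Nat.strong_induction_on with
  | _ p ih =>
    match p with
    | 0 => intro _; rw [pvRecon_zero, pvRecon_zero]
    | pp + 1 =>
      intro h
      rw [pvRecon_succ, pvRecon_succ, ← h (pp + 1) le_rfl]
      cases hh : pr.getD (pp + 1) none with
      | none => rfl
      | some e =>
        obtain ⟨si, w⟩ := e
        by_cases hsi : si.toNat ≤ pp
        · simp only [hsi, dif_pos]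
          rw [ih si.toNat (by omega) (fun r hr => h r (by omega))]
        · simp only [hsi, dif_neg, not_false_iff]

-- A's inner test 'targetString[i:].find(str) == 0 and i + len(str) < m + 1' is B's test
-- 'str == targetString[i:i+len(str)]'
theorem pvCond_iff (target w : String) (f : Nat) (hf : f ≤ target.toList.length) :
    (PySem.Str.find (PySem.Str.slice target (some (f : Int)) none) w = 0 ∧
      (f : Int) + PySem.Str.len w < (target.toList.length : Int) + 1) ↔
    w = PySem.Str.slice target (some (f : Int)) (some ((f : Int) + PySem.Str.len w)) := by
  rw [← String.toList_inj]
  simp only [PySem.Str.len_eq, PySem.Str.find_eq, PySem.Str.toList_slice,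
    PySem.Chars.slice_eq_listSlice, PySem.List.slice_from_natCast, PySem.List.slice_natCast_add]
  set T := target.toList
  set W := w.toList
  have hfind : PySem.Chars.find (T.drop f) W = 0 ↔ W <+: T.drop f := by
    constructor
    · intro h0
      have h := PySem.Chars.find_spec (s := T.drop f) (sub := W) (by rw [h0])
      rw [h0] at h
      simpa using h.1
    · intro hp
      have hnn : 0 ≤ PySem.Chars.find (T.drop f) W :=
        (PySem.Chars.find_nonneg_iff _ _).mpr hp.isInfix
      have h := PySem.Chars.find_spec hnn
      by_contra hne
      have hpos : 0 < (PySem.Chars.find (T.drop f) W).toNat := by omega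
      exact (h.2 0 hpos) (by simpa using hp)
  constructor
  · rintro ⟨h0, _⟩
    exact List.prefix_iff_eq_take.mp (hfind.mp h0)
  · intro he
    have hk : W.length ≤ (T.drop f).length := by
      have := congrArg List.length he
      simp only [List.length_take] at this
      omega
    refine ⟨hfind.mpr (List.prefix_iff_eq_take.mpr he), ?_⟩
    have hd : (T.drop f).length = T.length - f := List.length_drop
    omega

theorem pvWalk_spec (pr : List (Option (Int × String)))
    (hP : ∀ p si w, pr.getD p none = some (si, w) → ∃ sn : Nat, si = (sn : Int) ∧ sn < p) :
    ∀ p fuel res l, p ≤ fuel → pvRecon pr p = some l →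
      pvWalk pr fuel (p : Int) res = res ++ l.reverse := by
  intro p
  induction p using Nat.strong_induction_on with
  | _ p ih =>
    intro fuel res l hfu hrec
    match p, hfu with
    | 0, _ =>
      rw [pvRecon_zero] at hrec
      obtain rfl : l = [] := by simpa using hrec.symm
      cases fuel with
      | zero => simp [pvWalk]
      | succ fu => simp [pvWalk]
    | pp + 1, hfu =>
      obtain ⟨fu, rfl⟩ : ∃ fu, fuel = fu + 1 := ⟨fuel - 1, by omega⟩
      rw [pvRecon_succ] at hrec
      cases hh : pr.getD (pp + 1) none with
      | none => rw [hh] at hrec; exact absurd hrec (by simp)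
      | some e =>
        obtain ⟨si, w⟩ := e
        rw [hh] at hrec
        obtain ⟨sn, rfl, hsn⟩ := hP (pp + 1) si w hh
        have hsi : (sn : Int).toNat ≤ pp := by omega
        simp only [dif_pos hsi] at hrec
        obtain ⟨l', hl', rfl⟩ : ∃ l', pvRecon pr (sn : Int).toNat = some l' ∧ l = l' ++ [w] := by
          cases hr : pvRecon pr (sn : Int).toNat with
          | none => rw [hr] at hrec; exact absurd hrec (by simp)
          | some l' => rw [hr] at hrec; exact ⟨l', rfl, by simpa using hrec.symm⟩
        have hcast : ((pp + 1 : Nat) : Int) = (pp : Int) + 1 := by push_cast; ring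
        rw [pvWalk]
        rw [if_pos (by positivity), PySem.List.pyGetD_natCast, hh]
        show pvWalk pr fu ((sn : Nat) : Int) (res ++ [w]) = res ++ (l' ++ [w]).reverse
        have hto : (sn : Int).toNat = sn := Int.toNat_natCast sn
        rw [hto] at hl'
        have := ih sn (by omega) fu (res ++ [w]) l' (by omega) hl'
        rw [this]
        simp

-- one simultaneous update of table / (dist, pred) at position q preserves the invariant
theorem pvInvUpdate {m' f : Nat} {t d pr} (q : Nat) (hfq : f < q) (hq : q ≤ m')
    (s : String) (cur : List String)
    (hI : pvInv m' (f + 1) t d pr) (hcur : t.getD f none = some cur) :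
    pvInv m' (f + 1) (t.set q (some (cur ++ [s]))) (d.set q (some ((cur.length : Int) + 1)))
      (pr.set q (some ((f : Int), s))) := by
  obtain ⟨hlt, hld, hlp, hP, hD, hR⟩ := hI
  have hqt : q < t.length := by omega
  have hqd : q < d.length := by omega
  have hqp : q < pr.length := by omega
  have hprq : ∀ r, r ≤ f → (pr.set q (some ((f : Int), s))).getD r none = pr.getD r none := by
    intro r hr
    rw [pv_getD_set _ q hqp, if_neg (by omega)]
  refine ⟨by simp [hlt], by simp [hld], by simp [hlp], ?_, ?_, ?_⟩
  · intro p si w hp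
    rw [pv_getD_set _ q hqp] at hp
    by_cases hpq : p = q
    · rw [if_pos hpq] at hp
      obtain ⟨rfl, rfl⟩ : (f : Int) = si ∧ s = w := by
        have := Option.some_injective _ hp
        exact ⟨congrArg Prod.fst this, congrArg Prod.snd this⟩
      exact ⟨f, rfl, by omega, by omega⟩
    · rw [if_neg hpq] at hp
      exact hP p si w hp
  · intro p hp
    rw [pv_getD_set _ q hqd, pv_getD_set _ q hqt]
    by_cases hpq : p = q
    · rw [if_pos hpq, if_pos hpq]
      simp
    · rw [if_neg hpq, if_neg hpq]
      exact hD p hp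
  · intro p hp
    rw [pv_getD_set _ q hqt]
    by_cases hpq : p = q
    · subst hpq
      rw [if_pos rfl]
      obtain ⟨pp, rfl⟩ : ∃ pp, p = pp + 1 := ⟨p - 1, by omega⟩
      rw [pvRecon_succ, pv_getD_set _ (pp + 1) hqp, if_pos rfl]
      show some (cur ++ [s]) =
        if _h : ((f : Int)).toNat ≤ pp then
          (pvRecon (pr.set (pp + 1) (some ((f : Int), s))) ((f : Int)).toNat).map (· ++ [s])
        else none
      rw [dif_pos (by omega : ((f : Int)).toNat ≤ pp)]
      rw [Int.toNat_natCast]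
      rw [← pvRecon_congr pr _ f (fun r hr => (hprq r hr).symm)]
      rw [← hR f (by omega), hcur]
      rfl
    · rw [if_neg hpq, hR p hp]
      cases p with
      | zero => rw [pvRecon_zero, pvRecon_zero]
      | succ pp =>
        rw [pvRecon_succ, pvRecon_succ, pv_getD_set _ q hqp, if_neg hpq]
        cases hh : pr.getD (pp + 1) none with
        | none => rfl
        | some e =>
          obtain ⟨si, w⟩ := e
          obtain ⟨sn, rfl, hsn, hsnf⟩ := hP (pp + 1) si w hh
          have hrec : pvRecon pr sn = pvRecon (pr.set q (some ((f : Int), s))) sn :=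
            pvRecon_congr _ _ sn (fun r hr => (hprq r (by omega)).symm)
          show (if _h : ((sn : Int)).toNat ≤ pp then
              (pvRecon pr ((sn : Int)).toNat).map (· ++ [w]) else none) =
            (if _h : ((sn : Int)).toNat ≤ pp then
              (pvRecon (pr.set q (some ((f : Int), s))) ((sn : Int)).toNat).map (· ++ [w])
            else none)
          rw [Int.toNat_natCast, hrec]

-- one inner-loop iteration (one candidate piece) keeps the two states aligned
theorem pvStep (target s : String) (f : Nat) (hf : f ≤ target.toList.length)
    (t : List (Option (List String))) (d : List (Option Int)) (pr : List (Option (Int × String)))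
    (hI : pvInv target.toList.length (f + 1) t d pr) (hne : t.getD f none ≠ none) :
    pvInv target.toList.length (f + 1)
      (pvAInner ((target.toList.length : Int)) target (f : Int) t s)
      (pvBInner target (f : Int) (d, pr) s).1 (pvBInner target (f : Int) (d, pr) s).2
    ∧ (pvAInner ((target.toList.length : Int)) target (f : Int) t s).getD f none
        = t.getD f none := by
  have hlt := hI.1
  have hD := hI.2.2.2.2.1
  obtain ⟨cur, hcur⟩ : ∃ cur, t.getD f none = some cur := by
    cases h : t.getD f none with
    | none => exact absurd h hne
    | some c => exact ⟨c, rfl⟩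
  have hdf : d.getD f none = some ((cur.length : Int)) := by
    rw [hD f hf, hcur]
    rfl
  have hks : PySem.Str.len s = ((s.toList.length : Nat) : Int) := PySem.Str.len_eq s
  have hidx : (f : Int) + PySem.Str.len s = ((f + s.toList.length : Nat) : Int) := by
    rw [hks]; push_cast; ring
  have hcond := pvCond_iff target s f hf
  simp only [pvAInner, pvBInner]
  by_cases hG : s = PySem.Str.slice target (some (f : Int)) (some ((f : Int) + PySem.Str.len s))
  · rw [if_pos (hcond.mpr hG), if_pos hG]
    simp only [hidx, PySem.List.pyGetD_natCast, PySem.List.pySetD_natCast, hcur, hdf]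
    rcases Nat.eq_zero_or_pos s.toList.length with hk0 | hkpos
    · simp only [hk0, Nat.add_zero, hcur, hdf]
      rw [if_neg (by simp : ¬(cur ++ [s]).length < cur.length),
        if_neg (by omega : ¬(cur.length : Int) + 1 < (cur.length : Int))]
      exact ⟨hI, hcur⟩
    · have hfq : f < f + s.toList.length := by omega
      have hqm : f + s.toList.length ≤ target.toList.length := by
        have h2 := (hcond.mpr hG).2
        rw [hks] at h2
        omega
      cases hh : t.getD (f + s.toList.length) none with
      | none =>
        have hdq : d.getD (f + s.toList.length) none = none := by
          rw [hD _ hqm, hh]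
          rfl
        simp only [hdq]
        refine ⟨pvInvUpdate _ hfq hqm s cur hI hcur, ?_⟩
        rw [pv_getD_set _ _ (by omega), if_neg (by omega)]
        exact hcur
      | some old =>
        have hdq : d.getD (f + s.toList.length) none = some ((old.length : Int)) := by
          rw [hD _ hqm, hh]
          rfl
        simp only [hdq]
        by_cases himp : (cur ++ [s]).length < old.length
        · rw [if_pos himp, if_pos (by simp at himp; omega)]
          refine ⟨pvInvUpdate _ hfq hqm s cur hI hcur, ?_⟩
          rw [pv_getD_set _ _ (by omega), if_neg (by omega)]
          exact hcur
        · rw [if_neg himp, if_neg (by simp at himp ⊢; omega)]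
          exact ⟨hI, hcur⟩
  · rw [if_neg (fun hc => hG (hcond.mp hc)), if_neg hG]
    exact ⟨hI, rfl⟩

theorem pvInnerFold (target : String) (f : Nat) (hf : f ≤ target.toList.length)
    (arr : List String) :
    ∀ t d pr, pvInv target.toList.length (f + 1) t d pr → t.getD f none ≠ none →
    pvInv target.toList.length (f + 1)
      (arr.foldl (pvAInner ((target.toList.length : Int)) target (f : Int)) t)
      (arr.foldl (pvBInner target (f : Int)) (d, pr)).1
      (arr.foldl (pvBInner target (f : Int)) (d, pr)).2
    ∧ (arr.foldl (pvAInner ((target.toList.length : Int)) target (f : Int)) t).getD f none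
        = t.getD f none := by
  induction arr with
  | nil => exact fun t d pr hI _ => ⟨hI, rfl⟩
  | cons a as ih =>
    intro t d pr hI hne
    simp only [List.foldl_cons]
    obtain ⟨hI', heq⟩ := pvStep target a f hf t d pr hI hne
    rcases hst : pvBInner target (f : Int) (d, pr) a with ⟨d2, pr2⟩
    rw [hst] at hI'
    obtain ⟨hI'', heq'⟩ := ih _ _ _ hI' (by rw [heq]; exact hne)
    exact ⟨hI'', heq'.trans heq⟩

theorem pvOuterFold (array : List String) (target : String) :
    ∀ N, N ≤ target.toList.length + 1 →
    pvInv target.toList.length N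
      ((List.range N).foldl
        (fun t (k : Nat) =>
          if PySem.List.pyGetD t ((k : Nat) : Int) none ≠ none then
            array.foldl (pvAInner ((target.toList.length : Int)) target ((k : Nat) : Int)) t
          else t)
        (pvT0 target.toList.length))
      ((List.range N).foldl
        (fun st (k : Nat) =>
          if PySem.List.pyGetD st.1 ((k : Nat) : Int) none ≠ none then
            array.foldl (pvBInner target ((k : Nat) : Int)) st
          else st)
        (pvD0 target.toList.length, pvP0 target.toList.length)).1
      ((List.range N).foldl
        (fun st (k : Nat) =>
          if PySem.List.pyGetD st.1 ((k : Nat) : Int) none ≠ none then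
            array.foldl (pvBInner target ((k : Nat) : Int)) st
          else st)
        (pvD0 target.toList.length, pvP0 target.toList.length)).2 := by
  intro N
  induction N with
  | zero => intro _; simpa using pvInv_init target.toList.length
  | succ N ih =>
    intro hN
    have hNm : N ≤ target.toList.length := by omega
    have hI := ih (by omega)
    rcases hst : (List.range N).foldl
        (fun st (k : Nat) =>
          if PySem.List.pyGetD st.1 ((k : Nat) : Int) none ≠ none then
            array.foldl (pvBInner target ((k : Nat) : Int)) st
          else st)
        (pvD0 target.toList.length, pvP0 target.toList.length) with ⟨dN, prN⟩
    rw [hst] at hI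
    set tN := (List.range N).foldl
        (fun t (k : Nat) =>
          if PySem.List.pyGetD t ((k : Nat) : Int) none ≠ none then
            array.foldl (pvAInner ((target.toList.length : Int)) target ((k : Nat) : Int)) t
          else t)
        (pvT0 target.toList.length) with htN
    simp only [List.range_succ, List.foldl_append, List.foldl_cons, List.foldl_nil, hst, ← htN]
    have hD := hI.2.2.2.2.1
    have hg : (PySem.List.pyGetD dN ((N : Nat) : Int) none ≠ none) ↔
        (PySem.List.pyGetD tN ((N : Nat) : Int) none ≠ none) := by
      rw [PySem.List.pyGetD_natCast, PySem.List.pyGetD_natCast, hD N hNm]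
      cases tN.getD N none <;> simp
    by_cases hgA : PySem.List.pyGetD tN ((N : Nat) : Int) none ≠ none
    · rw [if_pos hgA, if_pos (hg.mpr hgA)]
      have h2 := pvInnerFold target N hNm array tN dN prN (pvInv_mono (Nat.le_succ N) hI)
        (by rwa [PySem.List.pyGetD_natCast] at hgA)
      exact h2.1
    · rw [if_neg hgA, if_neg (fun h => hgA (hg.mp h))]
      exact pvInv_mono (Nat.le_succ N) hI

-- ===== VERDICT (by name: the statement is the Claim_ definition above) =====
theorem stringConstructTab_spec : Claim_equal_stringConstructTab := by
  intro array target _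
  unfold Spec_stringConstructTab stringConstructTab stringConstructTab_alt
  have hlen : PySem.Str.len target = ((target.toList.length : Nat) : Int) :=
    PySem.Str.len_eq target
  have hone : ((target.toList.length : Nat) : Int) + 1
      = ((target.toList.length + 1 : Nat) : Int) := by push_cast; ring
  have ht0 : PySem.List.pySetD
      (List.replicate (target.toList.length + 1) (none : Option (List String))) 0 (some [])
      = pvT0 target.toList.length := by
    rw [PySem.List.pySetD_of_nonneg _ _ (le_refl 0)]
    rfl
  have hd0 : PySem.List.pySetD
      (List.replicate (target.toList.length + 1) (none : Option Int)) 0 (some 0)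
      = pvD0 target.toList.length := by
    rw [PySem.List.pySetD_of_nonneg _ _ (le_refl 0)]
    rfl
  have hp0 : List.replicate (target.toList.length + 1) (none : Option (Int × String))
      = pvP0 target.toList.length := rfl
  simp only [hlen, hone, Int.toNat_natCast, PySem.List.pyRange_zero_nat, List.foldl_map,
    ht0, hd0, hp0]
  have hI := pvOuterFold array target (target.toList.length + 1) le_rfl
  generalize hTF : (List.foldl
      (fun t k =>
        if PySem.List.pyGetD t ((k : Nat) : Int) none ≠ none then
          List.foldl (pvAInner ((target.toList.length : Int)) target ((k : Nat) : Int)) t array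
        else t)
      (pvT0 target.toList.length) (List.range (target.toList.length + 1))) = tF at hI ⊢
  generalize hSF : (List.foldl
      (fun st k =>
        if PySem.List.pyGetD st.1 ((k : Nat) : Int) none ≠ none then
          List.foldl (pvBInner target ((k : Nat) : Int)) st array
        else st)
      (pvD0 target.toList.length, pvP0 target.toList.length)
      (List.range (target.toList.length + 1))) = sF at hI ⊢
  obtain ⟨dF, prF⟩ := sF
  obtain ⟨hlt, hld, hlp, hP, hD, hR⟩ := hI
  dsimp only at hP hD hR
  rw [PySem.List.pyGetD_natCast, PySem.List.pyGetD_natCast]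
  have hDm := hD target.toList.length le_rfl
  have hRm := hR target.toList.length le_rfl
  cases hTm : tF.getD target.toList.length none with
  | none =>
    simp only [List.getD_eq_getElem?_getD, String.length_toList] at hDm hTm
    simp [hDm, hTm]
  | some l =>
    have hP' : ∀ p si w, prF.getD p none = some (si, w) → ∃ sn : Nat, si = (sn : Int) ∧ sn < p :=
      fun p si w hp => (hP p si w hp).imp (fun sn e => ⟨e.1, e.2.1⟩)
    have hrec : pvRecon prF target.toList.length = some l := by
      rw [← hRm]
      exact hTm
    have hwalk := pvWalk_spec prF hP' target.toList.length (target.toList.length + 1) [] l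
      (by omega) hrec
    simp only [List.getD_eq_getElem?_getD, String.length_toList] at hDm hTm hwalk
    simp [hDm, hTm, hwalk]
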